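-- pv_equiv track=rewrite | github.com/ckoons/BubbleSpacetimeTheory | play/toy_259_topology_fiat_correlation.py | build_vig
-- ===== SOURCE A (Python) =====
-- from collections import defaultdict
--
-- def build_vig(n, clauses):
--     """Build Variable Interaction Graph.
--     Returns adjacency set and edge list.
--     """
--     edges = set()
--     adj = defaultdict(set)
--     for clause in clauses:
--         variables = [abs(lit) for lit in clause]
--         for i in range(len(variables)):
--             for j in range(i + 1, len(variables)):
--                 u, v = min(variables[i], variables[j]), max(variables[i], variables[j])
--                 if u != v:
--                     edges.add((u, v))
--                     adj[u].add(v)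
--                     adj[v].add(u)
--     return adj, edges
-- ===== SOURCE B (Python) =====
-- from collections import defaultdict
--
-- def build_vig(n, clauses):
--     """Build Variable Interaction Graph.
--     Dedupe each clause's variables once, sweep shrinking suffixes of the
--     deduped list to collect the distinct edges (no min/max or u!=v guards
--     needed), then derive the whole adjacency table in a second pass.
--     """
--     edges = {}
--     for clause in clauses:
--         vs = list(dict.fromkeys(abs(lit) for lit in clause))
--         while len(vs) > 1:
--             x, vs = vs[0], vs[1:]
--             for y in vs:
--                 edges[(x, y) if x < y else (y, x)] = None
--     adj = defaultdict(set)
--     for u, v in edges: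
--         adj[u].add(v)
--         adj[v].add(u)
--     return adj, set(edges)
-- ===== Notes on version B (the rewrite author's own statement) =====
-- stated objective: alternative
-- what changed: A enumerates every index pair of the raw clause (duplicate literals included) with min/max normalization and a u!=v guard while updating the edge set and both adjacency entries simultaneously; B first dedupes each clause via dict.fromkeys so duplicates are never paired and no guard is needed, sweeps shrinking suffixes of the deduped list to collect the distinct edges in order, and only afterwards derives the whole adjacency table in a separate pass over the finished edge list.
import Mathlib
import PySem

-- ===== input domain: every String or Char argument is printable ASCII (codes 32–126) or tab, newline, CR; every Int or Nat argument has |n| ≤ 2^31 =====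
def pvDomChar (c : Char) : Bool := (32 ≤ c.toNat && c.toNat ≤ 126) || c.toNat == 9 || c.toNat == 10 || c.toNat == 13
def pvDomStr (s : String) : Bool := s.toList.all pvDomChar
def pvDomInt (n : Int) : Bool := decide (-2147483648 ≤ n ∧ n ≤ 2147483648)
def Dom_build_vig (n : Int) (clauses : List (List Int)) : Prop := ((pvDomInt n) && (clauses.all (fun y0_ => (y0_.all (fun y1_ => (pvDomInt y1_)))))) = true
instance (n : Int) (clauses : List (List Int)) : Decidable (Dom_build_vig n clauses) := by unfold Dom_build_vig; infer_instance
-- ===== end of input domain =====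

-- B dedupes each clause's variables once, sweeps shrinking suffixes of the deduped
-- list to collect the distinct edges (no min/max or u≠v guards), and derives the
-- adjacency table in a separate second pass, instead of A's enumeration of all raw
-- index pairs with simultaneous updates (objective: alternative decomposition).


-- shared helper: adj[k].add(x) on a defaultdict(set)
def pvAdjAdd (d : PySem.Dict Int (PySem.Set Int)) (k x : Int) : PySem.Dict Int (PySem.Set Int) :=
  d.modify k PySem.Set.empty (fun s => PySem.Set.add s x)

-- ===== PORT A =====
-- one pair (a, b): normalize with min/max, guard u ≠ v, update edges and both adjacency entries at once
def pvStepA (st : PySem.Set (Int × Int) × PySem.Dict Int (PySem.Set Int)) (a b : Int) :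
    PySem.Set (Int × Int) × PySem.Dict Int (PySem.Set Int) :=
  let u := min a b
  let v := max a b
  if u ≠ v then (PySem.Set.add st.1 (u, v), pvAdjAdd (pvAdjAdd st.2 u v) v u) else st

-- the nested 'for i / for j in range(i+1, …)' loop over all index pairs of one clause
def pvPairsA : List Int → (PySem.Set (Int × Int) × PySem.Dict Int (PySem.Set Int)) →
    PySem.Set (Int × Int) × PySem.Dict Int (PySem.Set Int)
  | [], st => st
  | x :: rest, st => pvPairsA rest (rest.foldl (fun st y => pvStepA st x y) st)

def build_vig (n : Int) (clauses : List (List Int)) : (List (Int × List Int)) × (List (Int × Int)) :=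
  let st := clauses.foldl (fun st clause => pvPairsA (clause.map (fun lit => |lit|)) st)
      (PySem.Set.empty, PySem.Dict.empty)
  (st.2.items, st.1)

-- ===== PORT B =====
-- '(x, y) if x < y else (y, x)'
def pvNorm (x y : Int) : Int × Int := if x < y then (x, y) else (y, x)

-- the 'while len(vs) > 1: x, vs = vs[0], vs[1:]; for y in vs: edges[...] = None' sweep
-- (edges is a Python dict used as an ordered set: setdefault order = PySem.Set.add order;
--  recursing once more on a singleton runs an empty inner loop, same as the while exit)
def pvSweep : List Int → PySem.Set (Int × Int) → PySem.Set (Int × Int)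
  | [], e => e
  | x :: vs, e => pvSweep vs (vs.foldl (fun e y => PySem.Set.add e (pvNorm x y)) e)

-- pass 2: derive the whole adjacency table from the finished edge list
def pvAdjOf (E : List (Int × Int)) : PySem.Dict Int (PySem.Set Int) :=
  E.foldl (fun d p => pvAdjAdd (pvAdjAdd d p.1 p.2) p.2 p.1) PySem.Dict.empty

def build_vig_alt (n : Int) (clauses : List (List Int)) : (List (Int × List Int)) × (List (Int × Int)) :=
  let edges := clauses.foldl
      (fun e clause => pvSweep (PySem.List.dedup (clause.map (fun lit => |lit|))) e)
      PySem.Set.empty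
  ((pvAdjOf edges).items, edges)

-- ===== PRECONDITION & SPEC =====
def Spec_build_vig (n : Int) (clauses : List (List Int)) (out : (List (Int × List Int)) × (List (Int × Int))) : Prop := out = build_vig_alt n clauses
instance (n : Int) (clauses : List (List Int)) (out : (List (Int × List Int)) × (List (Int × Int))) : Decidable (Spec_build_vig n clauses out) := by unfold Spec_build_vig; infer_instance

-- ===== CLAIM (what is proved, stated in full; the proofs are below) =====
def Claim_equal_build_vig : Prop := ∀ (n : Int) (clauses : List (List Int)), Dom_build_vig n clauses → Spec_build_vig n clauses (build_vig n clauses)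

-- ===== LEMMAS AND PROOFS =====

-- ---- ghost abstraction of A's pair loop: the edge-set component alone ----
def pvE : List Int → PySem.Set (Int × Int) → PySem.Set (Int × Int)
  | [], e => e
  | x :: rest, e =>
      pvE rest (rest.foldl (fun e y => if x ≠ y then PySem.Set.add e (min x y, max x y) else e) e)

-- the step function of pvAdjOf's fold, named for the lemmas
def pvG (d : PySem.Dict Int (PySem.Set Int)) (p : Int × Int) : PySem.Dict Int (PySem.Set Int) :=
  pvAdjAdd (pvAdjAdd d p.1 p.2) p.2 p.1

theorem pvAdjOf_eq_foldl (E : List (Int × Int)) : pvAdjOf E = E.foldl pvG PySem.Dict.empty := rfl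

theorem insert_getD_self {κ ν : Type} [BEq κ] [LawfulBEq κ] (d : PySem.Dict κ ν) (k : κ)
    (h : d.contains k = true) (hn : d.keys.Nodup) (dflt : ν) :
    d.insert k (d.getD k dflt) = d := by
  apply PySem.Dict.ext
  rw [PySem.Dict.items_insert_of_contains d _ h]
  conv_rhs => rw [← List.map_id d.items]
  apply List.map_congr_left
  intro p hp
  by_cases hk : p.1 = k
  · have hm : (k, p.2) ∈ d.items := by rw [← hk]; simpa using hp
    have := PySem.Dict.getD_of_mem_items d hm hn dflt
    rw [this, ← hk]; simp
  · simp [hk]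

theorem nodup_keys_pvAdjAdd (d : PySem.Dict Int (PySem.Set Int)) (k x : Int)
    (h : d.keys.Nodup) : (pvAdjAdd d k x).keys.Nodup := by
  unfold pvAdjAdd PySem.Dict.modify
  by_cases hc : d.contains k = true
  · rw [PySem.Dict.keys_insert_of_contains _ _ hc]; exact h
  · rw [PySem.Dict.keys_insert_of_not_contains _ _ (by simpa using hc)]
    refine List.nodup_append.mpr ⟨h, List.nodup_singleton _, ?_⟩
    intro a ha b hb
    rw [List.mem_singleton] at hb
    subst hb
    intro hak
    exact hc (by rw [PySem.Dict.contains_iff_mem_keys]; exact hak ▸ ha)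

theorem nodup_keys_pvAdjOf_fold (E : List (Int × Int)) :
    ∀ d : PySem.Dict Int (PySem.Set Int), d.keys.Nodup → (E.foldl pvG d).keys.Nodup := by
  induction E with
  | nil => intro d h; simpa using h
  | cons q E ih =>
      intro d h
      simpa using ih _ (nodup_keys_pvAdjAdd _ _ _ (nodup_keys_pvAdjAdd _ _ _ h))

-- membership is preserved by pvAdjAdd
theorem mem_getD_pvAdjAdd (d : PySem.Dict Int (PySem.Set Int)) (k' x k y : Int)
    (h : y ∈ d.getD k PySem.Set.empty) : y ∈ (pvAdjAdd d k' x).getD k PySem.Set.empty := by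
  unfold pvAdjAdd
  rw [PySem.Dict.getD_modify]
  by_cases hk : k = k'
  · simp only [hk, if_true]
    exact (PySem.Set.mem_add _ _ _).mpr (Or.inl (hk ▸ h))
  · simpa [hk] using h

theorem mem_getD_pvAdjAdd_self (d : PySem.Dict Int (PySem.Set Int)) (k x : Int) :
    x ∈ (pvAdjAdd d k x).getD k PySem.Set.empty := by
  unfold pvAdjAdd
  rw [PySem.Dict.getD_modify]
  simp only [if_true]
  exact (PySem.Set.mem_add _ _ _).mpr (Or.inr rfl)

theorem mem_getD_pvG_fold (E : List (Int × Int)) :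
    ∀ d k y, y ∈ d.getD k PySem.Set.empty → y ∈ (E.foldl pvG d).getD k PySem.Set.empty := by
  induction E with
  | nil => intro d k y h; simpa using h
  | cons q E ih =>
      intro d k y h
      exact ih _ _ _ (mem_getD_pvAdjAdd _ _ _ _ _ (mem_getD_pvAdjAdd _ _ _ _ _ h))

theorem mem_adjOf_fold (E : List (Int × Int)) :
    ∀ d (p : Int × Int), p ∈ E →
      p.2 ∈ (E.foldl pvG d).getD p.1 PySem.Set.empty ∧
      p.1 ∈ (E.foldl pvG d).getD p.2 PySem.Set.empty := by
  induction E with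
  | nil => intro d p h; simp at h
  | cons q E ih =>
      intro d p hp
      rcases List.mem_cons.mp hp with h | h
      · subst h
        constructor
        · exact mem_getD_pvG_fold E _ _ _
            (mem_getD_pvAdjAdd _ _ _ _ _ (mem_getD_pvAdjAdd_self _ _ _))
        · exact mem_getD_pvG_fold E _ _ _ (mem_getD_pvAdjAdd_self _ _ _)
      · exact ih _ _ h

-- adding an already-recorded neighbour is a no-op
theorem pvAdjAdd_of_mem (d : PySem.Dict Int (PySem.Set Int)) (k x : Int)
    (hn : d.keys.Nodup) (h : x ∈ d.getD k PySem.Set.empty) : pvAdjAdd d k x = d := by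
  have hc : d.contains k = true := by
    by_contra hc
    rw [PySem.Dict.getD_of_not_contains _ _ (by simpa using hc)] at h
    simp [PySem.Set.empty] at h
  unfold pvAdjAdd PySem.Dict.modify
  show d.insert k (PySem.Set.add (d.getD k PySem.Set.empty) x) = d
  rw [PySem.Set.add_of_mem h]
  exact insert_getD_self d k hc hn _

-- the single-pair step of A, expressed through the derived adjacency
theorem pvStepA_eq (e : PySem.Set (Int × Int)) (a b : Int) :
    pvStepA (e, pvAdjOf e) a b =
      (let e' := if a ≠ b then PySem.Set.add e (min a b, max a b) else e
       (e', pvAdjOf e')) := by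
  have hne : (min a b ≠ max a b) ↔ (a ≠ b) := by
    constructor <;> intro h <;> intro hab <;> apply h <;> omega
  simp only [pvStepA]
  by_cases hab : a = b
  · simp [hab]
  · simp only [hne, ne_eq, hab, not_false_eq_true, if_pos]
    by_cases hm : (min a b, max a b) ∈ e
    · rw [PySem.Set.add_of_mem hm]
      have hn := nodup_keys_pvAdjOf_fold e PySem.Dict.empty (by simp)
      have hmem := mem_adjOf_fold e PySem.Dict.empty (min a b, max a b) hm
      rw [pvAdjOf_eq_foldl] at *
      rw [pvAdjAdd_of_mem _ _ _ hn hmem.1]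
      rw [pvAdjAdd_of_mem _ _ _ hn hmem.2]
    · rw [PySem.Set.add_of_not_mem hm]
      rw [pvAdjOf_eq_foldl, pvAdjOf_eq_foldl, List.foldl_append]
      rfl

-- the inner 'for j' loop of A, edges-only
theorem inner_fold_eq (ys : List Int) :
    ∀ (e : PySem.Set (Int × Int)) (x : Int),
      ys.foldl (fun st y => pvStepA st x y) (e, pvAdjOf e) =
        (let e' := ys.foldl (fun e y => if x ≠ y then PySem.Set.add e (min x y, max x y) else e) e
         (e', pvAdjOf e')) := by
  induction ys with
  | nil => intro e x; rfl
  | cons y ys ih =>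
      intro e x
      simp only [List.foldl_cons]
      rw [pvStepA_eq]
      exact ih _ x

-- the whole pair loop of one clause tracks (edges, adjacency-derived-from-edges)
theorem pvPairsA_eq (vars : List Int) :
    ∀ (e : PySem.Set (Int × Int)),
      pvPairsA vars (e, pvAdjOf e) = (pvE vars e, pvAdjOf (pvE vars e)) := by
  induction vars with
  | nil => intro e; rfl
  | cons x rest ih =>
      intro e
      simp only [pvPairsA, pvE]
      rw [inner_fold_eq]
      exact ih _

theorem outer_fold_eq (clauses : List (List Int)) :
    ∀ (e : PySem.Set (Int × Int)),
      clauses.foldl (fun st clause => pvPairsA (clause.map (fun lit => |lit|)) st) (e, pvAdjOf e) =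
        (let e' := clauses.foldl (fun e clause => pvE (clause.map (fun lit => |lit|)) e) e
         (e', pvAdjOf e')) := by
  induction clauses with
  | nil => intro e; rfl
  | cons c clauses ih =>
      intro e
      simp only [List.foldl_cons]
      rw [pvPairsA_eq]
      exact ih _

-- ---- pair lists: both edge folds are Set.update with an explicit pair list ----

def pvPairsListA : List Int → List (Int × Int)
  | [] => []
  | x :: rest => (rest.filter (fun y => x != y)).map (pvNorm x) ++ pvPairsListA rest

def pvPairsList : List Int → List (Int × Int)
  | [] => []
  | x :: vs => vs.map (pvNorm x) ++ pvPairsList vs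

theorem pvNorm_eq_minmax (x y : Int) (h : x ≠ y) : pvNorm x y = (min x y, max x y) := by
  unfold pvNorm
  split_ifs with hlt <;> simp [min_def, max_def] <;> omega

theorem pvNorm_comm (x y : Int) (h : x ≠ y) : pvNorm x y = pvNorm y x := by
  unfold pvNorm
  split_ifs with h1 h2 h2 <;> first | rfl | omega

theorem pvNorm_right_inj (x a b : Int) (h : pvNorm x a = pvNorm x b) : a = b := by
  unfold pvNorm at h
  split_ifs at h <;> simp only [Prod.mk.injEq] at h <;> omega

theorem condfold_eq_update (rest : List Int) :
    ∀ (e : PySem.Set (Int × Int)) (x : Int),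
      rest.foldl (fun e y => if x ≠ y then PySem.Set.add e (min x y, max x y) else e) e =
        PySem.Set.update e ((rest.filter (fun y => x != y)).map (pvNorm x)) := by
  induction rest with
  | nil => intro e x; rfl
  | cons y rest ih =>
      intro e x
      by_cases h : x = y
      · simp only [List.foldl_cons, List.filter_cons, h, bne_self_eq_false, ne_eq,
          not_true_eq_false, if_false]
        exact ih e y
      · have hb : (x != y) = true := by simpa using h
        simp only [List.foldl_cons, List.filter_cons, hb, List.map_cons, ne_eq, h,
          not_false_eq_true, if_true, PySem.Set.update_cons, pvNorm_eq_minmax x y h]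
        exact ih _ x

theorem pvE_eq_update (vars : List Int) :
    ∀ e, pvE vars e = PySem.Set.update e (pvPairsListA vars) := by
  induction vars with
  | nil => intro e; rfl
  | cons x rest ih =>
      intro e
      simp only [pvE, pvPairsListA]
      rw [condfold_eq_update, ih, PySem.Set.update_append]

theorem pvSweep_eq_update (vs : List Int) :
    ∀ e, pvSweep vs e = PySem.Set.update e (pvPairsList vs) := by
  induction vs with
  | nil => intro e; rfl
  | cons x vs ih =>
      intro e
      simp only [pvSweep, pvPairsList]
      rw [← PySem.Set.update_map_eq_foldl_add, ih, PySem.Set.update_append]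

-- updating depends on the argument list only through its element set-in-order
theorem update_congr_ofList {s : PySem.Set (Int × Int)} {l1 l2 : List (Int × Int)}
    (h : PySem.Set.ofList l1 = PySem.Set.ofList l2) :
    PySem.Set.update s l1 = PySem.Set.update s l2 := by
  rw [PySem.Set.update_eq_append_filter, PySem.Set.update_eq_append_filter, h]

theorem update_of_forall_mem {α : Type} [BEq α] [LawfulBEq α] (l : List α) :
    ∀ (s : PySem.Set α), (∀ y ∈ l, y ∈ s) → PySem.Set.update s l = s := by
  induction l with
  | nil => intro s _; rfl
  | cons x l ih =>
      intro s h
      rw [PySem.Set.update_cons, PySem.Set.add_of_mem (h x (by simp))]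
      exact ih s (fun y hy => h y (by simp [hy]))

theorem update_middle_mem {α : Type} [BEq α] [LawfulBEq α] (s : PySem.Set α)
    (l1 l2 : List α) (c : α) (hc : c ∈ s) :
    PySem.Set.update s (l1 ++ c :: l2) = PySem.Set.update s (l1 ++ l2) := by
  rw [PySem.Set.update_append, PySem.Set.update_append, PySem.Set.update_cons,
    PySem.Set.add_of_mem ((PySem.Set.mem_update _ _ _).mpr (Or.inl hc))]

-- ofList commutes with filter and with an injective map
theorem ofList_filter {α : Type} [BEq α] [LawfulBEq α] (p : α → Bool) (l : List α) :
    PySem.Set.ofList (l.filter p) = (PySem.Set.ofList l).filter p := by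
  induction l with
  | nil => rfl
  | cons x l ih =>
      by_cases h : p x = true
      · simp only [List.filter_cons, h, if_true]
        rw [PySem.Set.ofList_cons, PySem.Set.ofList_cons, ih]
        unfold PySem.Set.discard
        simp only [List.filter_cons, h, if_true, List.filter_filter]
        congr 1
        exact List.filter_congr (fun y _ => by rw [Bool.and_comm])
      · rw [Bool.not_eq_true] at h
        simp only [List.filter_cons, h, Bool.false_eq_true, if_false]
        rw [ih, PySem.Set.ofList_cons]
        unfold PySem.Set.discard
        simp only [List.filter_cons, List.filter_filter, h, Bool.false_eq_true, if_false]
        exact (List.filter_congr (fun y _ => by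
          by_cases hy : y = x
          · subst hy; simp [h]
          · simp [hy])).symm

theorem ofList_map_inj {α β : Type} [BEq α] [LawfulBEq α] [BEq β] [LawfulBEq β]
    (f : α → β) (hf : ∀ a b, f a = f b → a = b) (l : List α) :
    PySem.Set.ofList (l.map f) = (PySem.Set.ofList l).map f := by
  induction l with
  | nil => rfl
  | cons x l ih =>
      rw [List.map_cons, PySem.Set.ofList_cons, PySem.Set.ofList_cons, ih, List.map_cons]
      unfold PySem.Set.discard
      rw [List.filter_map]
      exact congrArg (List.cons (f x)) (congrArg (List.map f)
        (List.filter_congr (fun y _ => by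
          simp only [Function.comp]
          by_cases hy : y = x
          · subst hy; simp
          · have hne : f y ≠ f x := fun h => hy (hf _ _ h)
            simp [hy, hne])))

-- dropping an already-covered variable from the sweep list is a no-op
theorem pvPairsList_drop_mid (L1 : List Int) :
    ∀ (L2 : List Int) (x : Int) (s : PySem.Set (Int × Int)),
      (∀ a ∈ L1, pvNorm a x ∈ s) → (∀ z ∈ L2, pvNorm x z ∈ s) →
      PySem.Set.update s (pvPairsList (L1 ++ x :: L2)) =
        PySem.Set.update s (pvPairsList (L1 ++ L2)) := by
  induction L1 with
  | nil =>
      intro L2 x s _ h2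
      simp only [List.nil_append, pvPairsList, PySem.Set.update_append]
      rw [update_of_forall_mem _ s (by
        intro y hy
        rcases List.mem_map.mp hy with ⟨z, hz, rfl⟩
        exact h2 z hz)]
  | cons a L1 ih =>
      intro L2 x s h1 h2
      simp only [List.cons_append, pvPairsList]
      rw [PySem.Set.update_append, PySem.Set.update_append]
      have hmid : s.update (List.map (pvNorm a) (L1 ++ x :: L2)) =
          s.update (List.map (pvNorm a) (L1 ++ L2)) := by
        rw [List.map_append, List.map_cons, List.map_append]
        exact update_middle_mem s _ _ _ (h1 a (by simp))
      rw [hmid]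
      exact ih L2 x _
        (fun b hb => (PySem.Set.mem_update _ _ _).mpr (Or.inl (h1 b (by simp [hb]))))
        (fun z hz => (PySem.Set.mem_update _ _ _).mpr (Or.inl (h2 z hz)))

-- the key combinatorial fact: A's guarded raw-pair stream and B's deduped sweep
-- produce the same first-occurrence edge list
theorem key_ofList (vars : List Int) :
    PySem.Set.ofList (pvPairsListA vars) =
      PySem.Set.ofList (pvPairsList (PySem.List.dedup vars)) := by
  induction vars with
  | nil => rfl
  | cons x rest ih =>
      have hD : PySem.Set.ofList (((rest.filter (fun y => x != y)).map (pvNorm x))) =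
          (PySem.Set.discard (PySem.Set.ofList rest) x).map (pvNorm x) := by
        rw [ofList_map_inj _ (pvNorm_right_inj x), ofList_filter]
        unfold PySem.Set.discard
        exact congrArg (List.map (pvNorm x)) (List.filter_congr (fun y _ => by
          simp only [bne]
          by_cases hy : y = x
          · subst hy; simp
          · have hxy : x ≠ y := fun h => hy h.symm
            simp [hy, hxy]))
      have hnodupD : (PySem.Set.discard (PySem.Set.ofList rest) x).Nodup :=
        PySem.Set.nodup_discard (PySem.Set.ofList rest) x (PySem.Set.nodup_ofList rest)
      have hmapnodup : ((PySem.Set.discard (PySem.Set.ofList rest) x).map (pvNorm x)).Nodup :=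
        hnodupD.map_on (fun a _ b _ hab => pvNorm_right_inj x a b hab)
      unfold PySem.List.dedup at ih ⊢
      rw [PySem.Set.ofList_cons]
      simp only [pvPairsListA, pvPairsList]
      rw [PySem.Set.ofList_append, PySem.Set.ofList_append, hD,
        PySem.Set.ofList_eq_self_of_nodup _ hmapnodup]
      rw [update_congr_ofList ih]
      -- remains: drop x (if present) from the sweep list
      by_cases hx : x ∈ PySem.Set.ofList rest
      · rcases List.append_of_mem hx with ⟨L1, L2, hsplit⟩
        have hnod : (PySem.Set.ofList rest).Nodup := PySem.Set.nodup_ofList rest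
        rw [hsplit] at hnod
        have hxL1 : x ∉ L1 := by
          intro h
          exact (List.nodup_append.mp hnod).2.2 x h x (by simp) rfl
        have hxL2 : x ∉ L2 := by
          have := (List.nodup_append.mp hnod).2.1
          simp only [List.nodup_cons] at this
          exact this.1
        have hdiscard : PySem.Set.discard (L1 ++ x :: L2) x = L1 ++ L2 := by
          unfold PySem.Set.discard
          rw [List.filter_append, List.filter_cons]
          simp only [beq_self_eq_true, Bool.not_true, Bool.false_eq_true, if_false]
          rw [List.filter_eq_self.mpr (fun y hy => by
              simp only [Bool.not_eq_true', beq_eq_false_iff_ne, ne_eq]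
              intro h; exact hxL1 (h ▸ hy)),
            List.filter_eq_self.mpr (fun y hy => by
              simp only [Bool.not_eq_true', beq_eq_false_iff_ne, ne_eq]
              intro h; exact hxL2 (h ▸ hy))]
        rw [hsplit, hdiscard]
        refine pvPairsList_drop_mid L1 L2 x _ ?_ ?_
        · intro a ha
          have hax : a ≠ x := fun h => hxL1 (h ▸ ha)
          rw [pvNorm_comm a x hax]
          exact List.mem_map.mpr ⟨a, by simp [ha], rfl⟩
        · intro z hz
          exact List.mem_map.mpr ⟨z, by simp [hz], rfl⟩
      · have : PySem.Set.discard (PySem.Set.ofList rest) x = PySem.Set.ofList rest := by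
          unfold PySem.Set.discard
          exact List.filter_eq_self.mpr (fun y hy => by
            simp only [Bool.not_eq_true', beq_eq_false_iff_ne, ne_eq]
            intro h; exact hx (h ▸ hy))
        rw [this]

-- per-clause: A's edge fold equals B's deduped sweep
theorem pvE_eq_sweep (vars : List Int) (e : PySem.Set (Int × Int)) :
    pvE vars e = pvSweep (PySem.List.dedup vars) e := by
  rw [pvE_eq_update, pvSweep_eq_update]
  exact update_congr_ofList (key_ofList vars)

-- ===== VERDICT (by name: the statement is the Claim_ definition above) =====
theorem build_vig_spec : Claim_equal_build_vig := by
  intro n clauses _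
  unfold Spec_build_vig build_vig build_vig_alt
  have h0 : (PySem.Dict.empty : PySem.Dict Int (PySem.Set Int)) = pvAdjOf PySem.Set.empty := rfl
  rw [h0, outer_fold_eq]
  have hfun : (fun e clause => pvE (clause.map (fun lit => |lit|)) e) =
      (fun (e : PySem.Set (Int × Int)) (clause : List Int) =>
        pvSweep (PySem.List.dedup (clause.map (fun lit => |lit|))) e) := by
    funext e clause
    exact pvE_eq_sweep _ e
  simp only [hfun]
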